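-- pv_equiv track=rewrite | github.com/NICESONY/Student_SON | Algorithm_study/기초/알고리즘_공부_05_19.py | solution
-- ===== SOURCE A (Python) =====
-- from collections import deque
--
-- def solution(l, r):
--     queue = deque([5])
--     results = []
--
--     while queue:
--         num = queue.popleft()
--
--         if num > r:
--             continue
--
--         if l <= num <= r:
--             results.append(num)
--
--         # 새 숫자를 큐에 추가
--         queue.append(num * 10)
--         queue.append(num * 10 + 5)
--
--     results = sorted(results)
--
--     if not results:
--         return [-1]
--
--     return results
-- ===== SOURCE B (Python) =====
-- def solution(l, r):
--     # Enumerate the 5/0-digit numbers directly by digit length: for each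
--     # length d (while the smallest d-digit candidate 5*10**(d-1) fits under r),
--     # run over all bitmasks for the d-1 trailing digits (bit -> digit 5) in
--     # ascending order; results come out already sorted, so no sort is needed.
--     results = []
--     d = 1
--     while 5 * 10 ** (d - 1) <= r:
--         base = 5 * 10 ** (d - 1)
--         for mask in range(2 ** (d - 1)):
--             # reinterpret mask's binary digits in base 10, scaled by 5
--             suffix = 0
--             place = 1
--             m = mask
--             while m:
--                 if m % 2 == 1:
--                     suffix += 5 * place
--                 m //= 2
--                 place *= 10
--             num = base + suffix
--             if l <= num <= r:
--                 results.append(num)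
--         d += 1
--     if not results:
--         return [-1]
--     return results
-- ===== Notes on version B (the rewrite author's own statement) =====
-- stated objective: alternative
-- what changed: Replaces the queue-driven BFS over the 0/5-digit tree plus a final sort with a direct structural enumeration: for each digit length, bitmasks over the trailing digits generate the candidates in ascending order, so no queue and no sort are needed.
import Mathlib
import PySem

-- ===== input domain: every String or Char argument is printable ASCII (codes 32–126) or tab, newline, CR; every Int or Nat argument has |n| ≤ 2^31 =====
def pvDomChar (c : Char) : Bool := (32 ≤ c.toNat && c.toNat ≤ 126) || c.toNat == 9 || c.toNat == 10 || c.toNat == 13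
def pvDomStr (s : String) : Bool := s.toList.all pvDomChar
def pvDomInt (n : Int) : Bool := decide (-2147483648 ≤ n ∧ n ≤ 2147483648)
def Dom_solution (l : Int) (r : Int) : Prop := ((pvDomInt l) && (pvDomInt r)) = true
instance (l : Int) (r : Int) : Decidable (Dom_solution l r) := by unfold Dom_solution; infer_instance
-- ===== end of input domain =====

-- B is an alternative of the same cost: it enumerates the 0/5-digit numbers by digit
-- length with bitmasks (already in ascending order) instead of A's BFS queue + sort.

-- ===== PORT A =====
-- termination helpers for the ports (cited by name in decreasing_by / proof arguments)
theorem pow10_lt (e : Nat) : (10 : Int) ^ e < 10 ^ (e + 1) := by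
  have h1 : (0 : Int) < 10 ^ e := by positivity
  calc (10 : Int) ^ e < 10 ^ e * 10 := by linarith
  _ = 10 ^ (e + 1) := by ring

theorem fA_dec1 (r x : Int) (h : 5 ≤ x ∧ x ≤ r) :
    (r + 1 - 10 * x).toNat < (r + 1 - x).toNat := by omega

theorem fA_dec2 (r x : Int) (h : 5 ≤ x ∧ x ≤ r) :
    (r + 1 - (10 * x + 5)).toNat < (r + 1 - x).toNat := by omega

-- Size of the subtree of candidates at or below value x that are ≤ r
-- (termination measure for the BFS while-loop; not part of the computed value).
def fA (r : Int) (x : Int) : Nat :=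
  if h : 5 ≤ x ∧ x ≤ r then 1 + fA r (10 * x) + fA r (10 * x + 5) else 0
termination_by (r + 1 - x).toNat
decreasing_by
  · exact fA_dec1 r x h
  · exact fA_dec2 r x h

theorem fA_eq (r x : Int) (h1 : 5 ≤ x) (h2 : x ≤ r) :
    fA r x = 1 + fA r (10 * x) + fA r (10 * x + 5) := by
  rw [fA]; simp [h1, h2]

theorem restGe (num : Int) (rest : List Int) (h : ∀ x ∈ num :: rest, 5 ≤ x) :
    ∀ x ∈ rest, 5 ≤ x := fun x hx => h x (List.mem_cons_of_mem _ hx)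

theorem pushGe (num : Int) (rest : List Int) (h : ∀ x ∈ num :: rest, 5 ≤ x) :
    ∀ x ∈ rest ++ [num * 10, num * 10 + 5], 5 ≤ x := by
  intro x hx
  rcases List.mem_append.1 hx with hx | hx
  · exact h x (List.mem_cons_of_mem _ hx)
  · have h5 : 5 ≤ num := h num List.mem_cons_self
    simp at hx
    rcases hx with rfl | rfl <;> omega

theorem loopA_dec1 (r num : Int) (rest : List Int) :
    (rest.map (fun x => 2 * fA r x + 1)).sum <
      ((num :: rest).map (fun x => 2 * fA r x + 1)).sum := by
  simp [List.map_cons]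

theorem loopA_dec2 (r num : Int) (rest : List Int) (h5 : 5 ≤ num) (hle : num ≤ r) :
    ((rest ++ [num * 10, num * 10 + 5]).map (fun x => 2 * fA r x + 1)).sum <
      ((num :: rest).map (fun x => 2 * fA r x + 1)).sum := by
  simp [List.map_cons, List.map_append, List.sum_append,
    fA_eq r num h5 hle, mul_comm num 10]
  omega

-- the while-queue loop of A; the proof argument (queue elements ≥ 5) only guards
-- termination, the computation is A's step for step.
def loopA (l r : Int) : (q : List Int) → (∀ x ∈ q, 5 ≤ x) → List Int → List Int
  | [], _, results => results
  | num :: rest, h, results =>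
    if hgt : num > r then
      loopA l r rest (restGe num rest h) results
    else
      loopA l r (rest ++ [num * 10, num * 10 + 5]) (pushGe num rest h)
        (if l ≤ num ∧ num ≤ r then results ++ [num] else results)
termination_by q => (q.map (fun x => 2 * fA r x + 1)).sum
decreasing_by
  · exact loopA_dec1 r num rest
  · exact loopA_dec2 r num rest (h num List.mem_cons_self) (not_lt.1 hgt)

theorem singGe : ∀ x ∈ [(5 : Int)], 5 ≤ x := by
  intro x hx; simp at hx; omega

def solution (l : Int) (r : Int) : List Int :=
  let results := loopA l r [5] singGe []
  let results := PySem.List.sorted results (fun x => x) false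
  if results = [] then [-1] else results

-- ===== PORT B =====
theorem bS_dec (m : Nat) (h : ¬ m = 0) : m / 2 < m := by omega

-- inner `while m:` of Source B: reinterpret mask's binary digits in base 10, scaled by 5
def bSuffix (m : Nat) (suffix : Int) (place : Int) : Int :=
  if h : m = 0 then suffix
  else bSuffix (m / 2) (if m % 2 = 1 then suffix + 5 * place else suffix) (place * 10)
termination_by m
decreasing_by exact bS_dec m h

theorem bLoop_dec (r : Int) (e : Nat) (h : 5 * (10 : Int) ^ e ≤ r) :
    (r + 1 - 5 * (10 : Int) ^ (e + 1)).toNat < (r + 1 - 5 * (10 : Int) ^ e).toNat := by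
  have := pow10_lt e; omega

-- the `while 5 * 10 ** (d - 1) <= r` loop; python's d is e + 1 (so d - 1 = e)
def bLoop (l r : Int) (e : Nat) (results : List Int) : List Int :=
  if h : 5 * (10 : Int) ^ e ≤ r then
    bLoop l r (e + 1)
      ((List.range (2 ^ e)).foldl
        (fun res mask =>
          let num := 5 * (10 : Int) ^ e + bSuffix mask 0 1
          if l ≤ num ∧ num ≤ r then res ++ [num] else res)
        results)
  else results
termination_by (r + 1 - 5 * (10 : Int) ^ e).toNat
decreasing_by exact bLoop_dec r e h

def solution_alt (l : Int) (r : Int) : List Int :=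
  let results := bLoop l r 0 []
  if results = [] then [-1] else results

-- ===== PRECONDITION & SPEC =====
def Spec_solution (l : Int) (r : Int) (out : List Int) : Prop := out = solution_alt l r
instance (l : Int) (r : Int) (out : List Int) : Decidable (Spec_solution l r out) := by unfold Spec_solution; infer_instance

-- ===== CLAIM (what is proved, stated in full; the proofs are below) =====
def Claim_equal_solution : Prop := ∀ (l : Int) (r : Int), Dom_solution l r → Spec_solution l r (solution l r)

-- ===== LEMMAS AND PROOFS =====

-- the full (unpruned) levels of the 0/5-digit tree: levelL e = numbers of e+1 digits
def levelL : Nat → List Int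
  | 0 => [5]
  | e + 1 => (levelL e).flatMap (fun x => [x * 10, x * 10 + 5])

-- children enqueued by A from a queue q (only parents ≤ r spawn)
def chilA (r : Int) (q : List Int) : List Int :=
  q.flatMap (fun x => if x ≤ r then [x * 10, x * 10 + 5] else [])

-- the elements collected from q
def collF (l r : Int) (q : List Int) : List Int :=
  q.filter (fun x => decide (l ≤ x ∧ x ≤ r))

-- the common reference output: levels from e on, filtered to [l, r]
def brest (l r : Int) (e : Nat) : List Int :=
  if 5 * (10 : Int) ^ e ≤ r then collF l r (levelL e) ++ brest l r (e + 1) else []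
termination_by (r + 1 - 5 * (10 : Int) ^ e).toNat
decreasing_by have := pow10_lt e; omega

theorem levelL_min (e : Nat) : ∀ x ∈ levelL e, 5 * (10 : Int) ^ e ≤ x := by
  induction e with
  | zero => intro x hx; simp [levelL] at hx; omega
  | succ e ih =>
    intro x hx
    simp only [levelL, List.mem_flatMap] at hx
    obtain ⟨y, hy, hx⟩ := hx
    have := ih y hy
    have hp : (0 : Int) < 10 ^ e := by positivity
    simp at hx
    have hpow : (10 : Int) ^ (e + 1) = 10 ^ e * 10 := by ring
    rcases hx with rfl | rfl <;> rw [hpow] <;> nlinarith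

theorem levelL_max (e : Nat) : ∀ x ∈ levelL e, x < (10 : Int) ^ (e + 1) := by
  induction e with
  | zero => intro x hx; simp [levelL] at hx; omega
  | succ e ih =>
    intro x hx
    simp only [levelL, List.mem_flatMap] at hx
    obtain ⟨y, hy, hx⟩ := hx
    have := ih y hy
    simp at hx
    have hpow : (10 : Int) ^ (e + 1 + 1) = 10 ^ (e + 1) * 10 := by ring
    rcases hx with rfl | rfl <;> rw [hpow] <;> nlinarith

theorem pairwise_flatMap_children (xs : List Int) (hxs : xs.Pairwise (· < ·)) :
    (xs.flatMap (fun x => [x * 10, x * 10 + 5])).Pairwise (· < ·) := by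
  induction xs with
  | nil => simp
  | cons x xs ih =>
    simp only [List.flatMap_cons]
    rw [List.pairwise_append]
    refine ⟨by simp, ih (List.Pairwise.of_cons hxs), ?_⟩
    intro a ha b hb
    simp only [List.mem_flatMap] at hb
    obtain ⟨z, hz, hb⟩ := hb
    have hxz : x < z := (List.pairwise_cons.1 hxs).1 z hz
    simp at ha hb
    rcases ha with rfl | rfl <;> rcases hb with rfl | rfl <;> omega

theorem levelL_pairwise (e : Nat) : (levelL e).Pairwise (· < ·) := by
  induction e with
  | zero => simp [levelL]
  | succ e ih => exact pairwise_flatMap_children _ ih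

-- === A side ===

-- loopA depends on its list arguments only (proof irrelevance)
theorem loopA_congr (l r : Int) {q q' res res' : List Int} (hq : q = q') (hres : res = res')
    (h : ∀ x ∈ q, 5 ≤ x) (h' : ∀ x ∈ q', 5 ≤ x) :
    loopA l r q h res = loopA l r q' h' res' := by
  subst hq; subst hres; rfl

theorem loopA_cons (l r num : Int) (rest : List Int) (h : ∀ x ∈ num :: rest, 5 ≤ x)
    (res : List Int) :
    loopA l r (num :: rest) h res =
      if num > r then loopA l r rest (restGe num rest h) res
      else loopA l r (rest ++ [num * 10, num * 10 + 5]) (pushGe num rest h)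
        (if l ≤ num ∧ num ≤ r then res ++ [num] else res) := by
  rw [loopA]; split <;> rfl

theorem loopA_gt (l r : Int) (q : List Int) : ∀ (h : ∀ x ∈ q, 5 ≤ x) (res : List Int),
    (∀ x ∈ q, r < x) → loopA l r q h res = res := by
  induction q with
  | nil => intro h res _; rw [loopA]
  | cons x q ih =>
    intro h res hq
    rw [loopA_cons, if_pos (hq x List.mem_cons_self)]
    exact ih _ res (fun y hy => hq y (List.mem_cons_of_mem _ hy))

theorem loopA_append (l r : Int) (q : List Int) :
    ∀ (c res : List Int) (h : ∀ x ∈ q ++ c, 5 ≤ x) (h' : ∀ x ∈ c ++ chilA r q, 5 ≤ x),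
      loopA l r (q ++ c) h res = loopA l r (c ++ chilA r q) h' (res ++ collF l r q) := by
  induction q with
  | nil =>
    intro c res h h'
    exact loopA_congr l r (by simp [chilA]) (by simp [collF]) h h'
  | cons x q ih =>
    intro c res h h'
    have h5x : 5 ≤ x := h x (by simp)
    have h2 : ∀ y ∈ x :: (q ++ c), 5 ≤ y := by rw [← List.cons_append]; exact h
    rw [loopA_congr l r (List.cons_append (a := x) (as := q) (bs := c)) rfl h h2, loopA_cons]
    by_cases hx : x > r
    · rw [if_pos hx]
      have hxr : ¬ x ≤ r := by omega
      have hchil : chilA r (x :: q) = chilA r q := by simp [chilA, hxr]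
      have hcoll : collF l r (x :: q) = collF l r q := by
        have hno : ¬ (l ≤ x ∧ x ≤ r) := by tauto
        simp [collF, hno]
      have h'q : ∀ y ∈ c ++ chilA r q, 5 ≤ y := by rw [← hchil]; exact h'
      exact (ih c res (restGe x (q ++ c) h2) h'q).trans
        (loopA_congr l r (by rw [hchil]) (by rw [hcoll]) _ _)
    · rw [if_neg hx]
      have hxr : x ≤ r := by omega
      have hchil : chilA r (x :: q) = [x * 10, x * 10 + 5] ++ chilA r q := by
        simp [chilA, hxr]
      have hnew : ∀ y ∈ q ++ (c ++ [x * 10, x * 10 + 5]), 5 ≤ y := by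
        intro y hy
        simp only [List.mem_append, List.mem_cons, List.not_mem_nil, or_false] at hy
        rcases hy with hy | hy | rfl | rfl
        · exact h2 y (by simp [hy])
        · exact h' y (by simp [hy])
        · omega
        · omega
      have hprime : ∀ y ∈ (c ++ [x * 10, x * 10 + 5]) ++ chilA r q, 5 ≤ y := by
        intro y hy
        simp only [List.mem_append, List.mem_cons, List.not_mem_nil, or_false] at hy
        rcases hy with (hy | rfl | rfl) | hy
        · exact h' y (by simp [hy])
        · omega
        · omega
        · exact h' y (by rw [hchil]; simp [hy])
      refine ((loopA_congr l r (by simp) rfl _ hnew).trans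
        ((ih _ _ hnew hprime).trans ?_))
      refine loopA_congr l r ?_ ?_ _ _
      · rw [hchil]; simp
      · by_cases hl : l ≤ x ∧ x ≤ r <;> simp [collF, hl]

theorem flatMap_filter_le (r : Int) (f : Int → List Int) (hf : ∀ x, ¬ x ≤ r → f x = [])
    (q : List Int) : q.flatMap f = (q.filter (fun x => decide (x ≤ r))).flatMap f := by
  induction q with
  | nil => rfl
  | cons x q ih =>
    by_cases hx : x ≤ r
    · simp [hx, List.flatMap_cons, ih]
    · simp [hx, List.flatMap_cons, ih, hf x hx]

theorem collF_eq_filter_filter (l r : Int) (q : List Int) :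
    collF l r q = (q.filter (fun x => decide (x ≤ r))).filter (fun x => decide (l ≤ x)) := by
  unfold collF
  rw [List.filter_filter]
  apply List.filter_congr
  intro x _
  by_cases h1 : l ≤ x <;> by_cases h2 : x ≤ r <;> simp [h1, h2]

theorem collF_of_filter_eq (l r : Int) (q q' : List Int)
    (hq : q.filter (fun x => decide (x ≤ r)) = q'.filter (fun x => decide (x ≤ r))) :
    collF l r q = collF l r q' := by
  rw [collF_eq_filter_filter, collF_eq_filter_filter, hq]

theorem chilA_filter_eq (r : Int) (q : List Int) (e : Nat)
    (hq : q.filter (fun x => decide (x ≤ r)) = (levelL e).filter (fun x => decide (x ≤ r))) :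
    (chilA r q).filter (fun x => decide (x ≤ r)) =
      (levelL (e + 1)).filter (fun x => decide (x ≤ r)) := by
  have filter_flatMap_helper : ∀ (f : Int → List Int) (xs : List Int),
      (xs.flatMap f).filter (fun x => decide (x ≤ r)) =
        xs.flatMap (fun a => (f a).filter (fun x => decide (x ≤ r))) := by
    intro f xs
    induction xs with
    | nil => rfl
    | cons x xs ih => simp [List.flatMap_cons, List.filter_append, ih]
  have hp1 : (1 : Int) ≤ 10 ^ e := one_le_pow₀ (by norm_num)
  calc (chilA r q).filter (fun x => decide (x ≤ r))
      = q.flatMap (fun x => (if x ≤ r then [x * 10, x * 10 + 5] else []).filter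
          (fun y => decide (y ≤ r))) := filter_flatMap_helper _ q
    _ = q.flatMap (fun x => if x ≤ r then [x * 10, x * 10 + 5].filter
          (fun y => decide (y ≤ r)) else []) := by
        apply List.flatMap_congr; intro x _; by_cases hx : x ≤ r <;> simp [hx]
    _ = (q.filter (fun x => decide (x ≤ r))).flatMap (fun x => if x ≤ r then
          [x * 10, x * 10 + 5].filter (fun y => decide (y ≤ r)) else []) :=
        flatMap_filter_le r _ (fun x hx => if_neg hx) q
    _ = ((levelL e).filter (fun x => decide (x ≤ r))).flatMap (fun x => if x ≤ r then
          [x * 10, x * 10 + 5].filter (fun y => decide (y ≤ r)) else []) := by rw [hq]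
    _ = (levelL e).flatMap (fun x => if x ≤ r then
          [x * 10, x * 10 + 5].filter (fun y => decide (y ≤ r)) else []) :=
        (flatMap_filter_le r _ (fun x hx => if_neg hx) (levelL e)).symm
    _ = (levelL e).flatMap (fun x => [x * 10, x * 10 + 5].filter (fun y => decide (y ≤ r))) := by
        apply List.flatMap_congr
        intro x hx
        by_cases hxr : x ≤ r
        · rw [if_pos hxr]
        · rw [if_neg hxr]
          have hx5 : 5 ≤ x := by nlinarith [levelL_min e x hx]
          have g1 : ¬ (x * 10 ≤ r) := by omega
          have g2 : ¬ (x * 10 + 5 ≤ r) := by omega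
          simp [List.filter, g1, g2]
    _ = (levelL (e + 1)).filter (fun x => decide (x ≤ r)) := by
        rw [levelL]; exact (filter_flatMap_helper _ (levelL e)).symm

theorem loopA_eq_brest (l r : Int) (e : Nat) (q : List Int) (h : ∀ x ∈ q, 5 ≤ x)
    (res : List Int)
    (hq : q.filter (fun x => decide (x ≤ r)) = (levelL e).filter (fun x => decide (x ≤ r))) :
    loopA l r q h res = res ++ brest l r e := by
  by_cases hc : 5 * (10 : Int) ^ e ≤ r
  · have h' : ∀ x ∈ chilA r q, 5 ≤ x := by
      intro x hx
      simp only [chilA, List.mem_flatMap] at hx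
      obtain ⟨y, hy, hx⟩ := hx
      have h5 : 5 ≤ y := h y hy
      by_cases hyr : y ≤ r <;> simp [hyr] at hx
      rcases hx with rfl | rfl <;> omega
    have hcoll : collF l r q = collF l r (levelL e) := collF_of_filter_eq l r _ _ hq
    have hch := chilA_filter_eq r q e hq
    rw [brest, if_pos hc]
    calc loopA l r q h res
        = loopA l r (q ++ []) (by simpa using h) res :=
          loopA_congr l r (by simp) rfl _ _
      _ = loopA l r ([] ++ chilA r q) (by simpa using h') (res ++ collF l r q) :=
          loopA_append l r q [] res _ _
      _ = loopA l r (chilA r q) h' (res ++ collF l r (levelL e)) :=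
          loopA_congr l r (by simp) (by rw [hcoll]) _ _
      _ = (res ++ collF l r (levelL e)) ++ brest l r (e + 1) :=
          loopA_eq_brest l r (e + 1) (chilA r q) h' _ hch
      _ = res ++ (collF l r (levelL e) ++ brest l r (e + 1)) := by simp
  · rw [brest, if_neg hc]
    have hp : (0 : Int) < 10 ^ e := by positivity
    have hlev : (levelL e).filter (fun x => decide (x ≤ r)) = [] := by
      rw [List.filter_eq_nil_iff]
      intro x hx
      have := levelL_min e x hx
      simp only [decide_eq_true_eq]
      omega
    have hqgt : ∀ x ∈ q, r < x := by
      intro x hx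
      by_contra hcon
      rw [not_lt] at hcon
      have hmem : x ∈ q.filter (fun x => decide (x ≤ r)) :=
        List.mem_filter.2 ⟨hx, by simpa using hcon⟩
      rw [hq, hlev] at hmem
      simp at hmem
    simpa using loopA_gt l r q h res hqgt
termination_by (r + 1 - 5 * (10 : Int) ^ e).toNat
decreasing_by have := pow10_lt e; omega

-- === B side ===

def bsVal (m : Nat) : Int := bSuffix m 0 1

theorem bSuffix_linear : ∀ (m : Nat) (s p : Int), bSuffix m s p = s + p * bsVal m := by
  intro m
  induction m using Nat.strong_induction_on with
  | _ m ih =>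
    intro s p
    by_cases hm : m = 0
    · subst hm; simp [bSuffix, bsVal]
    · have hlt : m / 2 < m := by omega
      rw [bSuffix, dif_neg hm, ih _ hlt]
      conv_rhs => rw [bsVal, bSuffix, dif_neg hm, ih _ hlt]
      by_cases hpar : m % 2 = 1 <;> simp [hpar] <;> ring

theorem bsVal_two_mul (m : Nat) : bsVal (2 * m) = 10 * bsVal m := by
  by_cases hm : m = 0
  · subst hm; simp [bsVal, bSuffix]
  · have h2 : 2 * m ≠ 0 := by omega
    rw [bsVal, bSuffix, dif_neg h2]
    have he : ¬ ((2 * m) % 2 = 1) := by omega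
    have hd : (2 * m) / 2 = m := by omega
    rw [if_neg he, hd, bSuffix_linear]
    ring

theorem bsVal_two_mul_add_one (m : Nat) : bsVal (2 * m + 1) = 10 * bsVal m + 5 := by
  have h2 : 2 * m + 1 ≠ 0 := by omega
  rw [bsVal, bSuffix, dif_neg h2]
  have he : (2 * m + 1) % 2 = 1 := by omega
  have hd : (2 * m + 1) / 2 = m := by omega
  rw [if_pos he, hd, bSuffix_linear]
  ring

theorem rangeTwoMul (n : Nat) :
    List.range (2 * n) = (List.range n).flatMap (fun m => [2 * m, 2 * m + 1]) := by
  induction n with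
  | zero => rfl
  | succ n ih =>
    have : 2 * (n + 1) = (2 * n) + 1 + 1 := by omega
    rw [this, List.range_succ, List.range_succ, List.range_succ, ih]
    simp

theorem levelL_eq_map (e : Nat) :
    levelL e = (List.range (2 ^ e)).map (fun m => 5 * (10 : Int) ^ e + bsVal m) := by
  induction e with
  | zero =>
    have h0 : bsVal 0 = 0 := by rw [bsVal, bSuffix]; simp
    simp [levelL, h0]
  | succ e ih =>
    have h2 : 2 ^ (e + 1) = 2 * 2 ^ e := by ring
    rw [levelL, ih, h2, rangeTwoMul, List.flatMap_map, List.map_flatMap]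
    apply List.flatMap_congr
    intro m _
    have hm0 := bsVal_two_mul m
    have hm1 := bsVal_two_mul_add_one m
    have hpow : (10 : Int) ^ (e + 1) = 10 ^ e * 10 := by ring
    simp [hm0, hm1, hpow]
    constructor <;> ring


theorem bInner_eq (l r base : Int) (masks : List Nat) (res : List Int) :
    masks.foldl
      (fun res mask =>
        let num := base + bSuffix mask 0 1
        if l ≤ num ∧ num ≤ r then res ++ [num] else res) res
    = res ++ (masks.map (fun m => base + bsVal m)).filter (fun x => decide (l ≤ x ∧ x ≤ r)) := by
  induction masks generalizing res with
  | nil => simp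
  | cons m ms ih =>
    rw [List.foldl_cons, List.map_cons, List.filter_cons, ih]
    dsimp only
    simp only [decide_eq_true_eq, bsVal]
    by_cases hm : l ≤ base + bSuffix m 0 1 ∧ base + bSuffix m 0 1 ≤ r
    · rw [if_pos hm, if_pos hm]; simp
    · rw [if_neg hm, if_neg hm]

theorem bLoop_eq_brest (l r : Int) (e : Nat) (res : List Int) :
    bLoop l r e res = res ++ brest l r e := by
  by_cases hc : 5 * (10 : Int) ^ e ≤ r
  · rw [bLoop, dif_pos hc, brest, if_pos hc, bLoop_eq_brest l r (e + 1),
      bInner_eq l r (5 * (10 : Int) ^ e) (List.range (2 ^ e)) res]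
    have : collF l r (levelL e) =
        ((List.range (2 ^ e)).map (fun m => 5 * (10 : Int) ^ e + bsVal m)).filter
          (fun x => decide (l ≤ x ∧ x ≤ r)) := by
      rw [collF, levelL_eq_map]
    rw [this, List.append_assoc]
  · rw [bLoop, dif_neg hc, brest, if_neg hc, List.append_nil]
termination_by (r + 1 - 5 * (10 : Int) ^ e).toNat
decreasing_by have := pow10_lt e; omega

-- === sortedness ===

theorem brest_sorted (l r : Int) (e : Nat) :
    (brest l r e).Pairwise (· ≤ ·) ∧ ∀ x ∈ brest l r e, 5 * (10 : Int) ^ e ≤ x := by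
  by_cases hc : 5 * (10 : Int) ^ e ≤ r
  · obtain ⟨ihp, ihm⟩ := brest_sorted l r (e + 1)
    rw [brest, if_pos hc]
    have hmem : ∀ x ∈ collF l r (levelL e), x ∈ levelL e := by
      intro x hx; exact (List.mem_filter.1 hx).1
    constructor
    · rw [List.pairwise_append]
      refine ⟨((levelL_pairwise e).sublist List.filter_sublist).imp le_of_lt,
        ihp, ?_⟩
      intro a ha b hb
      have hamax := levelL_max e a (hmem a ha)
      have hbmin := ihm b hb
      have hp : (0 : Int) < 10 ^ (e + 1) := by positivity
      nlinarith
    · intro x hx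
      rcases List.mem_append.1 hx with hx | hx
      · exact levelL_min e x (hmem x hx)
      · have := ihm x hx
        have := pow10_lt e
        have hp : (0 : Int) < 10 ^ e := by positivity
        nlinarith
  · rw [brest, if_neg hc]
    exact ⟨List.Pairwise.nil, by simp⟩
termination_by (r + 1 - 5 * (10 : Int) ^ e).toNat
decreasing_by have := pow10_lt e; omega

-- ===== VERDICT (by name: the statement is the Claim_ definition above) =====
theorem solution_spec : Claim_equal_solution := by
  intro l r _
  unfold Spec_solution solution solution_alt
  have hA : loopA l r [5] singGe [] = [] ++ brest l r 0 :=
    loopA_eq_brest l r 0 [5] _ [] rfl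
  have hB : bLoop l r 0 [] = [] ++ brest l r 0 := bLoop_eq_brest l r 0 []
  have hs : PySem.List.sorted (brest l r 0) (fun x => x) = brest l r 0 :=
    PySem.List.sorted_eq_self_of_pairwise _ _ (brest_sorted l r 0).1
  simp only [hA, hB, List.nil_append, hs]
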